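-- pv_equiv track=rewrite | github.com/d14405011-sudo/2026-python | weeks/week-10/solutions/1114405011/10252/q10252-Hand-typed.py | one_axis
-- ===== SOURCE A (Python) =====
-- from typing import List, Tuple
--
-- def one_axis(values: List[int]) -> Tuple[int, int]:
--     values.sort()
--     n = len(values)
--     l = values[(n - 1) // 2]
--     r = values[n // 2]
--     s = sum(abs(v - l) for v in values)
--     c = r - l + 1
--     return s, c
-- ===== SOURCE B (Python) =====
-- def one_axis(values):
--     a = sorted(values)
--     n = len(a)
--     h = n // 2
--     low = a[:h]
--     high = a[h:]
--     r = high[0]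
--     l = low[-1] if n % 2 == 0 else high[0]
--     s = sum(high) - sum(low) - (n % 2) * r
--     return s, r - l + 1
-- ===== Notes on version B (the rewrite author's own statement) =====
-- stated objective: alternative
-- what changed: A indexes both medians in the sorted list and loops over all elements summing |v - median|; B splits the sorted list into lower and upper halves, reads the medians off the halves' ends, and gets the deviation sum as sum(high) - sum(low) - (n%2)*median, with no per-element abs loop.
import Mathlib
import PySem

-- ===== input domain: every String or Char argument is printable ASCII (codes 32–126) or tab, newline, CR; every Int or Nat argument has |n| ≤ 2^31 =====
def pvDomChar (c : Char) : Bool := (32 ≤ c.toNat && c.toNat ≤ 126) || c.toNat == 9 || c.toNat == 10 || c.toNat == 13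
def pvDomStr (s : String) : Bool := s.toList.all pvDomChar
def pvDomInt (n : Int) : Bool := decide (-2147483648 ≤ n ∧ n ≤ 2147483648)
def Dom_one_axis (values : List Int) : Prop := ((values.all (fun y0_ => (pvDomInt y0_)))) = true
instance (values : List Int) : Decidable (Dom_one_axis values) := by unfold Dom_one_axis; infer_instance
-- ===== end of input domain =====

-- B splits the sorted list into lower/upper halves and computes the deviation sum as
-- sum(high) - sum(low) - (n%2)*median, reading the medians off the halves' ends, instead of
-- A's per-element loop over |v - median|; objective: alternative. NOTE: A sorts `values`
-- IN PLACE (caller-visible mutation); B does not mutate its argument — the equivalence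
-- proved here is about the return value.

-- ===== PORT A =====
def one_axis (values : List Int) : Int × Int :=
  let vs := PySem.List.sorted values (fun x => x) false   -- values.sort()
  let n : Int := vs.length
  let l := PySem.List.pyGetD vs (PySem.Int.floordiv (n - 1) 2) 0   -- values[(n-1)//2]
  let r := PySem.List.pyGetD vs (PySem.Int.floordiv n 2) 0         -- values[n//2]
  let s := vs.foldl (fun acc v => acc + |v - l|) 0                 -- sum(abs(v-l) for v in values)
  let c := r - l + 1
  (s, c)

-- ===== PORT B =====
def one_axis_alt (values : List Int) : Int × Int :=
  let a := PySem.List.sorted values (fun x => x) false    -- a = sorted(values)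
  let n : Int := a.length
  let h := PySem.Int.floordiv n 2                         -- h = n // 2
  let low := PySem.List.slice a none (some h)             -- low = a[:h]
  let high := PySem.List.slice a (some h) none            -- high = a[h:]
  let r := PySem.List.pyGetD high 0 0                     -- r = high[0]
  let l := if PySem.Int.mod n 2 = 0                       -- l = low[-1] if n % 2 == 0 else high[0]
           then PySem.List.pyGetD low (-1) 0
           else PySem.List.pyGetD high 0 0
  let s := high.sum - low.sum - PySem.Int.mod n 2 * r     -- s = sum(high) - sum(low) - (n % 2) * r
  (s, r - l + 1)

-- ===== PRECONDITION & SPEC =====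
-- Pre_ excludes only the empty list, on which the Python A (and B) raises IndexError.
def Pre_one_axis (values : List Int) : Prop := values ≠ []
instance (values : List Int) : Decidable (Pre_one_axis values) := by unfold Pre_one_axis; infer_instance
def pvWitness_one_axis : List Int := ([1, 3, 2])
def Spec_one_axis (values : List Int) (out : Int × Int) : Prop := out = one_axis_alt values
instance (values : List Int) (out : Int × Int) : Decidable (Spec_one_axis values out) := by unfold Spec_one_axis; infer_instance

-- ===== CLAIM =====
def Claim_equal_one_axis : Prop := ∀ (values : List Int), Dom_one_axis values → Pre_one_axis values → Spec_one_axis values (one_axis values)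

-- ===== LEMMAS AND PROOFS =====

-- On a list of elements all ≤ l, each |v - l| is l - v.
theorem pv_sum_abs_le (l : Int) : ∀ (L : List Int), (∀ x ∈ L, x ≤ l) →
    (L.map (fun v => |v - l|)).sum = (L.length : Int) * l - L.sum := by
  intro L
  induction L with
  | nil => intro _; simp
  | cons x L ih =>
    intro hb
    have hx : x ≤ l := hb x (by simp)
    have hax : |x - l| = l - x := by rw [abs_sub_comm]; exact abs_of_nonneg (by omega)
    have := ih (fun y hy => hb y (by simp [hy]))
    simp only [List.map_cons, List.sum_cons, List.length_cons, this, hax]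
    push_cast; ring

-- On a list of elements all ≥ l, each |v - l| is v - l.
theorem pv_sum_abs_ge (l : Int) : ∀ (L : List Int), (∀ x ∈ L, l ≤ x) →
    (L.map (fun v => |v - l|)).sum = L.sum - (L.length : Int) * l := by
  intro L
  induction L with
  | nil => intro _; simp
  | cons x L ih =>
    intro hb
    have hx : l ≤ x := hb x (by simp)
    have hax : |x - l| = x - l := abs_of_nonneg (by omega)
    have := ih (fun y hy => hb y (by simp [hy]))
    simp only [List.map_cons, List.sum_cons, List.length_cons, this, hax]
    push_cast; ring

theorem one_axis_agree (values : List Int) (hne0 : values ≠ []) :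
    one_axis values = one_axis_alt values := by
  unfold one_axis one_axis_alt
  simp only []
  have hsne : PySem.List.sorted values (fun x => x) false ≠ [] := by
    simpa [PySem.List.sorted_eq_nil_iff] using hne0
  set vs := PySem.List.sorted values (fun x => x) false with hvs
  set n : Nat := vs.length with hn
  have hn1 : 1 ≤ n := by
    rcases vs with _ | _
    · exact absurd rfl hsne
    · simp [hn]
  set h : Nat := n / 2 with hh
  -- normalise the Int arithmetic on indices to Nat
  have e1 : PySem.Int.floordiv ((vs.length : Int) - 1) 2 = (((n - 1) / 2 : Nat) : Int) := by
    rw [show ((vs.length : Int) - 1) = (((n - 1 : Nat)) : Int) by rw [← hn]; omega]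
    exact_mod_cast PySem.Int.floordiv_natCast (n - 1) 2
  have e2 : PySem.Int.floordiv ((vs.length : Int)) 2 = ((h : Nat) : Int) := by
    rw [← hn]; exact_mod_cast PySem.Int.floordiv_natCast n 2
  have e3 : PySem.Int.mod ((vs.length : Int)) 2 = (((n % 2 : Nat)) : Int) := by
    rw [← hn]; exact_mod_cast PySem.Int.mod_natCast n 2
  rw [e1, e2, e3, PySem.List.slice_to_natCast, PySem.List.slice_from_natCast]
  simp only [PySem.List.pyGetD_natCast, PySem.List.pyGetD_zero]
  -- monotonicity of the sorted list, stated on getD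
  have mono : ∀ i j : Nat, i ≤ j → j < n → vs.getD i 0 ≤ vs.getD j 0 := by
    intro i j hij hj
    rw [List.getD_eq_getElem vs 0 (by omega), List.getD_eq_getElem vs 0 (hn ▸ hj)]
    exact PySem.List.sorted_id_getElem_mono values hij (hn ▸ hj)
  -- the two medians, as getD on vs
  have hr : (vs.drop h).getD 0 0 = vs.getD h 0 := by
    simp [List.getD_eq_getElem?_getD, List.getElem?_drop]
  set l := vs.getD ((n - 1) / 2) 0 with hl
  -- every element of the lower half is ≤ l, every element of the upper half is ≥ l
  have hlow : ∀ x ∈ vs.take h, x ≤ l := by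
    intro x hx
    obtain ⟨i, hi, hxeq⟩ := List.mem_iff_getElem.mp hx
    have hi' : i < h := by simpa using lt_of_lt_of_le hi (by simp)
    have : (vs.take h)[i] = vs.getD i 0 := by
      rw [List.getElem_take, List.getD_eq_getElem vs 0 (by omega)]
    rw [← hxeq, this]
    exact mono i ((n - 1) / 2) (by omega) (by omega)
  have hhigh : ∀ x ∈ vs.drop h, l ≤ x := by
    intro x hx
    obtain ⟨i, hi, hxeq⟩ := List.mem_iff_getElem.mp hx
    have hi' : h + i < n := by have := hi; simp at this; omega
    have : (vs.drop h)[i] = vs.getD (h + i) 0 := by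
      rw [List.getElem_drop, List.getD_eq_getElem vs 0 (by omega)]
    rw [← hxeq, this]
    exact mono ((n - 1) / 2) (h + i) (by omega) hi'
  -- A's sum via the two halves
  have hsplit : vs = vs.take h ++ vs.drop h := (List.take_append_drop h vs).symm
  have hA : vs.foldl (fun acc v => acc + |v - l|) 0
      = ((h : Int) * l - (vs.take h).sum) + ((vs.drop h).sum - (((n - h : Nat)) : Int) * l) := by
    rw [PySem.List.foldl_add, zero_add]
    calc (vs.map (fun v => |v - l|)).sum
        = ((vs.take h).map (fun v => |v - l|)).sum + ((vs.drop h).map (fun v => |v - l|)).sum := by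
          rw [hsplit]; simp
      _ = ((h : Int) * l - (vs.take h).sum) + ((vs.drop h).sum - (((n - h : Nat)) : Int) * l) := by
          rw [pv_sum_abs_le l _ hlow, pv_sum_abs_ge l _ hhigh]
          congr 2
          · simp [List.length_take]; omega
          · simp [List.length_drop]; omega
  rw [hA, hr]
  -- B's l equals A's l
  have hlowlen : (vs.take h).length = h := by simp [List.length_take]; omega
  rcases Nat.even_or_odd n with he | ho
  · -- n even: h ≥ 1, low[-1] = vs[h-1] = vs[(n-1)/2]
    have hp : n % 2 = 0 := Nat.even_iff.mp he
    have hhge : 1 ≤ h := by omega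
    have hlne : vs.take h ≠ [] := by
      intro hc; rw [hc] at hlowlen; simp at hlowlen; omega
    have hBl : PySem.List.pyGetD (vs.take h) (-1) 0 = l := by
      rw [PySem.List.pyGetD_neg_one _ _ hlne, List.getLast_eq_getElem, hl]
      rw [List.getD_eq_getElem vs 0 (by omega)]
      rw [List.getElem_take]
      congr 1
      · omega
    simp only [hp, Nat.cast_zero, hBl]
    refine Prod.ext ?_ rfl
    show ((h : Int) * l - (vs.take h).sum) + ((vs.drop h).sum - (((n - h : Nat)) : Int) * l)
        = (vs.drop h).sum - (vs.take h).sum - 0 * vs.getD h 0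
    have : ((n - h : Nat) : Int) = (h : Int) := by omega
    rw [this]; ring
  · -- n odd: l = vs[(n-1)/2] = vs[h]
    have hp : n % 2 = 1 := Nat.odd_iff.mp ho
    have hm : (n - 1) / 2 = h := by omega
    have hBl : vs.getD h 0 = l := by rw [hl, hm]
    simp only [hp, Nat.cast_one, show (1 : Int) ≠ 0 by norm_num, hBl]
    refine Prod.ext ?_ rfl
    show ((h : Int) * l - (vs.take h).sum) + ((vs.drop h).sum - (((n - h : Nat)) : Int) * l)
        = (vs.drop h).sum - (vs.take h).sum - 1 * l
    have : ((n - h : Nat) : Int) = (h : Int) + 1 := by omega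
    rw [this]; ring

-- ===== VERDICT =====
theorem one_axis_spec : Claim_equal_one_axis := by
  intro values _hdom hpre
  unfold Spec_one_axis
  exact one_axis_agree values hpre
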